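-- pv_equiv track=rewrite | github.com/nickyfoto/lcpy | src/lcpy/df.py | range_to_freq
-- ===== SOURCE A (Python) =====
-- def range_to_freq(requests, n):
--     """
--     given a range of requests
--     return frequnency array
--
--     n: length of array
--     requests: array of [start, end] indices
--
--     https://leetcode.com/problems/maximum-sum-obtained-of-any-permutation/
--     1, 2, 3, 4, 5
--        +  +  +
--     +  +
--     --------------
--     1  2  1  1  0
--     """
--
--     diff = [0] * (n + 1)
--     for s, e in requests:
--         diff[s] += 1
--         diff[e + 1] -= 1
--     freq = [0] * n
--     pre = 0
--     for i in range(n):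
--         pre += diff[i]
--         freq[i] = pre
--     return freq
-- ===== SOURCE B (Python) =====
-- def range_to_freq(requests, n):
--     """
--     given a range of requests
--     return frequnency array
--
--     n: length of array
--     requests: array of [start, end] indices
--     """
--     freq = [0] * n
--     for s, e in requests:
--         for i in range(s, e + 1):
--             freq[i] += 1
--     return freq
-- ===== Notes on version B (the rewrite author's own statement) =====
-- stated objective: simpler
-- what changed: Replaces the difference-array + prefix-sum two-pass scheme with a single direct pass that increments freq[i] for every i in each requested range.
-- intended difference: On requests containing some [s, e] with e+1 < s (mismatched endpoints denoting an empty range), A returns -1 'frequencies' on [e+1, s-1] while B returns the count of requests actually covering each index (0 there), which is the intended value for a frequency array. — e.g. on range_to_freq([[2, 0]], 3): A returns [0, -1, 0], B returns [0, 0, 0]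
-- outside the precondition, e.g. on range_to_freq([[-3, -1]], 2): A returns [0, 0], B raises IndexError; on range_to_freq([[-1, 1]], 2): A returns [0, 0], B returns [1, 2]
import Mathlib
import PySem

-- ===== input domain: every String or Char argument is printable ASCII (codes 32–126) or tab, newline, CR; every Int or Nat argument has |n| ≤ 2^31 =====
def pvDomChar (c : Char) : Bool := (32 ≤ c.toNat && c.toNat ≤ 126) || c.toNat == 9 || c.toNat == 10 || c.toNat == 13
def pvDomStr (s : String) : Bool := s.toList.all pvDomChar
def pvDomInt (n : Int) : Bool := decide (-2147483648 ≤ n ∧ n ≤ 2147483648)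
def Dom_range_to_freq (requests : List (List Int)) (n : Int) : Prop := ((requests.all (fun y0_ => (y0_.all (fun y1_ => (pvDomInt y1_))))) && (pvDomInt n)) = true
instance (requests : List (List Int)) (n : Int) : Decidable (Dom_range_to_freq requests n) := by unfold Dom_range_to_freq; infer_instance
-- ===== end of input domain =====

-- B replaces A's difference-array + prefix-sum two-pass scheme with one direct pass that
-- increments freq[i] for every index of each requested range (objective: simpler).


-- ===== PORT A =====
-- diff[s] += 1 / diff[e+1] -= 1, then freq by a running prefix sum over range(n).
-- A request that is not a 2-element list raises ValueError in Python (outside Pre_): the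
-- fold leaves the state unchanged there.
def range_to_freq (requests : List (List Int)) (n : Int) : List Int :=
  let diff : List Int := List.replicate (n + 1).toNat 0
  let diff := requests.foldl (fun diff r =>
    match r with
    | [s, e] =>
        let diff := PySem.List.pySetD diff s (PySem.List.pyGetD diff s 0 + 1)
        PySem.List.pySetD diff (e + 1) (PySem.List.pyGetD diff (e + 1) 0 - 1)
    | _ => diff) diff
  let freq : List Int := List.replicate n.toNat 0
  let st := (PySem.List.pyRange 0 n 1).foldl (fun (st : Int × List Int) i =>
    let pre := st.1 + PySem.List.pyGetD diff i 0
    (pre, PySem.List.pySetD st.2 i pre)) (0, freq)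
  st.2

-- ===== PORT B =====
-- freq = [0]*n, then for each [s, e] increment freq[i] for every i in range(s, e+1).
def range_to_freq_alt (requests : List (List Int)) (n : Int) : List Int :=
  let freq : List Int := List.replicate n.toNat 0
  requests.foldl (fun freq r =>
    match r with
    | [s, e] =>
        (PySem.List.pyRange s (e + 1) 1).foldl
          (fun f i => PySem.List.pySetD f i (PySem.List.pyGetD f i 0 + 1)) freq
    | [] => freq
    | [_] => freq
    | _ :: _ :: _ :: _ => freq) freq

-- ===== PRECONDITION & SPEC =====
-- Pre_ restricts to requests [s, e] whose diff indices s and e+1 lie in [0, n]: it excludes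
-- inputs where A raises (IndexError on out-of-range indices, ValueError on wrong arity) and
-- the negative-index corner, where A's value comes from Python wraparound into the length-(n+1)
-- diff array while B wraps into the length-n freq array or raises IndexError (s < -n) — an
-- accident of each implementation's indexing that neither value specifies (see cites).
def Pre_range_to_freq (requests : List (List Int)) (n : Int) : Prop :=
  (requests.all (fun r =>
    match r with
    | [] => false
    | [_] => false
    | [s, e] => decide (0 ≤ s ∧ s ≤ n ∧ 0 ≤ e + 1 ∧ e + 1 ≤ n)
    | _ :: _ :: _ :: _ => false)) = true
instance (requests : List (List Int)) (n : Int) : Decidable (Pre_range_to_freq requests n) := by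
  unfold Pre_range_to_freq; infer_instance

def pvWitness_range_to_freq : List (List Int) × Int := ([[0, 1], [1, 2]], 4)

-- On requests [s, e] with e+1 < s (mismatched endpoints denoting an empty range), A returns
-- -1 "frequencies" on [e+1, s-1], while B returns the count of requests actually covering each
-- index (0 there), which is the intended value for a frequency array.
def D_range_to_freq (requests : List (List Int)) (n : Int) : Prop :=
  ∃ r ∈ requests, r.length = 2 ∧ r.getD 1 0 + 1 < r.getD 0 0
instance (requests : List (List Int)) (n : Int) : Decidable (D_range_to_freq requests n) := by
  unfold D_range_to_freq; infer_instance

def Spec_range_to_freq (requests : List (List Int)) (n : Int) (out : List Int) : Prop := ¬ D_range_to_freq requests n → out = range_to_freq_alt requests n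
instance (requests : List (List Int)) (n : Int) (out : List Int) : Decidable (Spec_range_to_freq requests n out) := by unfold Spec_range_to_freq; infer_instance

def pvDiffWitness_range_to_freq : List (List Int) × Int := ([[2, 0]], 3)
def pvDiffWitnessOut_range_to_freq : (List Int) × (List Int) := ([0, -1, 0], [0, 0, 0])

-- ===== CLAIM (what is proved, stated in full; the proofs are below) =====
def Claim_unchanged_range_to_freq : Prop := ∀ (requests : List (List Int)) (n : Int), Dom_range_to_freq requests n → Pre_range_to_freq requests n → Spec_range_to_freq requests n (range_to_freq requests n)
def Claim_changed_range_to_freq : Prop := Dom_range_to_freq (pvDiffWitness_range_to_freq.1) (pvDiffWitness_range_to_freq.2) ∧ Pre_range_to_freq (pvDiffWitness_range_to_freq.1) (pvDiffWitness_range_to_freq.2) ∧ D_range_to_freq (pvDiffWitness_range_to_freq.1) (pvDiffWitness_range_to_freq.2) ∧ range_to_freq (pvDiffWitness_range_to_freq.1) (pvDiffWitness_range_to_freq.2) = pvDiffWitnessOut_range_to_freq.1 ∧ range_to_freq_alt (pvDiffWitness_range_to_freq.1) (pvDiffWitness_range_to_freq.2) = pvDiffWitnessOut_range_to_freq.2 ∧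 pvDiffWitnessOut_range_to_freq.1 ≠ pvDiffWitnessOut_range_to_freq.2

-- ===== LEMMAS AND PROOFS =====

-- partial sum of the first j+1 entries of a difference array
def pvPartial (d : List Int) (j : Nat) : Int := ∑ k ∈ Finset.range (j + 1), d.getD k 0

theorem pvGetD_set (d : List Int) (k : Nat) (x : Int) (hk : k < d.length) (i : Nat) :
    (d.set k x).getD i 0 = d.getD i 0 + (if i = k then x - d.getD k 0 else 0) := by
  by_cases h : i = k
  · subst h
    simp [List.getD_eq_getElem?_getD, hk]
  · simp [List.getD_eq_getElem?_getD, Ne.symm h, h]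

theorem pvGetD_replicate (m k : Nat) : (List.replicate m (0 : Int)).getD k 0 = 0 := by
  simp [List.getD_eq_getElem?_getD, List.getElem?_replicate]
  split <;> rfl

theorem pvPartial_replicate (m j : Nat) : pvPartial (List.replicate m (0 : Int)) j = 0 := by
  unfold pvPartial
  simp

theorem pvPartial_set (d : List Int) (k : Nat) (x : Int) (hk : k < d.length) (j : Nat) :
    pvPartial (d.set k x) j = pvPartial d j + (if k ≤ j then x - d.getD k 0 else 0) := by
  unfold pvPartial
  have h1 : ∀ i ∈ Finset.range (j + 1), (d.set k x).getD i 0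
      = d.getD i 0 + (if i = k then x - d.getD k 0 else 0) := fun i _ => pvGetD_set d k x hk i
  rw [Finset.sum_congr rfl h1, Finset.sum_add_distrib, Finset.sum_ite_eq' (Finset.range (j+1))]
  have hmem : k ∈ Finset.range (j + 1) ↔ k ≤ j := by simp
  by_cases hkj : k ≤ j <;> simp [hmem, hkj]

-- B's inner loop: incrementing every index of range(a, b) adds an indicator pointwise.
theorem pvBump_range (N : Nat) : ∀ (a b : Int) (f : List Int), (b - a).toNat = N → 0 ≤ a →
    b ≤ (f.length : Int) →
    ((PySem.List.pyRange a b 1).foldl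
        (fun f i => PySem.List.pySetD f i (PySem.List.pyGetD f i 0 + 1)) f).length = f.length ∧
    ∀ j : Nat, ((PySem.List.pyRange a b 1).foldl
        (fun f i => PySem.List.pySetD f i (PySem.List.pyGetD f i 0 + 1)) f).getD j 0
      = f.getD j 0 + (if a ≤ (j : Int) ∧ (j : Int) < b then 1 else 0) := by
  induction N with
  | zero =>
    intro a b f hN ha hb
    have hba : b ≤ a := by omega
    rw [PySem.List.pyRange_one_eq_nil hba]
    refine ⟨rfl, fun j => ?_⟩
    have hno : ¬ (a ≤ (j : Int) ∧ (j : Int) < b) := by omega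
    simp [hno]
  | succ N ih =>
    intro a b f hN ha hb
    have hab : a < b := by omega
    have halen : a < (f.length : Int) := by omega
    rw [PySem.List.pyRange_one_cons hab]
    simp only [List.foldl_cons]
    have hset : PySem.List.pySetD f a (PySem.List.pyGetD f a 0 + 1)
        = f.set a.toNat (f.getD a.toNat 0 + 1) := by
      rw [PySem.List.pySetD_of_nonneg f _ ha, PySem.List.pyGetD_eq_getElem f 0 ha halen,
        List.getD_eq_getElem]
    rw [hset]
    have hcast : (a.toNat : Int) = a := Int.toNat_of_nonneg ha
    obtain ⟨hL, hG⟩ := ih (a + 1) b (f.set a.toNat (f.getD a.toNat 0 + 1)) (by omega) (by omega)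
      (by simp; omega)
    refine ⟨by rw [hL]; simp, fun j => ?_⟩
    rw [hG j, pvGetD_set f a.toNat _ (by omega) j]
    split_ifs <;> omega

-- A's second loop: the running prefix sum writes pvPartial diff j at every j < m.
theorem pvPrefix_loop (diff f0 : List Int) (m : Nat) (hm : m ≤ f0.length) :
    (((PySem.List.pyRange 0 (m : Int) 1).foldl (fun (st : Int × List Int) i =>
        (st.1 + PySem.List.pyGetD diff i 0,
         PySem.List.pySetD st.2 i (st.1 + PySem.List.pyGetD diff i 0))) (0, f0)).2).length
      = f0.length ∧
    ((PySem.List.pyRange 0 (m : Int) 1).foldl (fun (st : Int × List Int) i =>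
        (st.1 + PySem.List.pyGetD diff i 0,
         PySem.List.pySetD st.2 i (st.1 + PySem.List.pyGetD diff i 0))) (0, f0)).1
      = ∑ k ∈ Finset.range m, diff.getD k 0 ∧
    ∀ j : Nat, (((PySem.List.pyRange 0 (m : Int) 1).foldl (fun (st : Int × List Int) i =>
        (st.1 + PySem.List.pyGetD diff i 0,
         PySem.List.pySetD st.2 i (st.1 + PySem.List.pyGetD diff i 0))) (0, f0)).2).getD j 0
      = if j < m then pvPartial diff j else f0.getD j 0 := by
  induction m with
  | zero =>
    rw [show ((0 : Nat) : Int) = 0 by rfl, PySem.List.pyRange_one_eq_nil le_rfl]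
    exact ⟨rfl, by simp, fun j => by simp⟩
  | succ m ih =>
    obtain ⟨hL, hPre, hG⟩ := ih (by omega)
    have hcast : ((m + 1 : Nat) : Int) = (m : Int) + 1 := by push_cast; ring
    rw [hcast, PySem.List.pyRange_one_succ_right (by positivity), List.foldl_append]
    simp only [List.foldl_cons, List.foldl_nil]
    set st := (PySem.List.pyRange 0 (m : Int) 1).foldl (fun (st : Int × List Int) i =>
        (st.1 + PySem.List.pyGetD diff i 0,
         PySem.List.pySetD st.2 i (st.1 + PySem.List.pyGetD diff i 0))) (0, f0) with hst
    have hmlen : m < st.2.length := by omega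
    have hpre' : st.1 + PySem.List.pyGetD diff (m : Int) 0 = pvPartial diff m := by
      rw [hPre, PySem.List.pyGetD_natCast, pvPartial, Finset.sum_range_succ]
    refine ⟨by simp [hL], by simp only [hpre']; rfl, fun j => ?_⟩
    simp only [hpre', PySem.List.pySetD_natCast]
    rw [pvGetD_set st.2 m _ hmlen j]
    by_cases hjm : j = m
    · subst hjm
      rw [hG j, if_neg (Nat.lt_irrefl j), if_pos rfl, if_pos (Nat.lt_succ_self j)]
      ring
    · have h4 : (j < m + 1) ↔ (j < m) := by omega
      rw [hG j, if_neg hjm, add_zero]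
      simp only [h4]

-- the simultaneous invariant over the requests fold:
-- prefix sums of A's difference array = B's directly incremented frequency array
theorem pvMain (n' : Nat) : ∀ (rs : List (List Int)),
    (∀ r ∈ rs, ∃ s e : Int, r = [s, e] ∧ 0 ≤ s ∧ s ≤ e + 1 ∧ e + 1 ≤ (n' : Int)) →
    ∀ (d f : List Int), d.length = n' + 1 → f.length = n' →
    (∀ j : Nat, j < n' → pvPartial d j = f.getD j 0) →
    (rs.foldl (fun diff r =>
      match r with
      | [s, e] =>
          PySem.List.pySetD (PySem.List.pySetD diff s (PySem.List.pyGetD diff s 0 + 1)) (e + 1)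
            (PySem.List.pyGetD (PySem.List.pySetD diff s (PySem.List.pyGetD diff s 0 + 1))
              (e + 1) 0 - 1)
      | _ => diff) d).length = n' + 1 ∧
    (rs.foldl (fun freq r =>
      match r with
      | [s, e] =>
          (PySem.List.pyRange s (e + 1) 1).foldl
            (fun f i => PySem.List.pySetD f i (PySem.List.pyGetD f i 0 + 1)) freq
      | [] => freq
      | [_] => freq
      | _ :: _ :: _ :: _ => freq) f).length = n' ∧
    ∀ j : Nat, j < n' →
      pvPartial (rs.foldl (fun diff r =>
        match r with
        | [s, e] =>
            PySem.List.pySetD (PySem.List.pySetD diff s (PySem.List.pyGetD diff s 0 + 1)) (e + 1)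
              (PySem.List.pyGetD (PySem.List.pySetD diff s (PySem.List.pyGetD diff s 0 + 1))
                (e + 1) 0 - 1)
        | _ => diff) d) j
      = (rs.foldl (fun freq r =>
        match r with
        | [s, e] =>
            (PySem.List.pyRange s (e + 1) 1).foldl
              (fun f i => PySem.List.pySetD f i (PySem.List.pyGetD f i 0 + 1)) freq
        | [] => freq
        | [_] => freq
        | _ :: _ :: _ :: _ => freq) f).getD j 0 := by
  intro rs
  induction rs with
  | nil =>
    intro _ d f hd hf hinv
    exact ⟨hd, hf, hinv⟩
  | cons r rs ih =>
    intro hP d f hd hf hinv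
    obtain ⟨s, e, rfl, hs, hse, hen⟩ := hP r (List.mem_cons_self ..)
    simp only [List.foldl_cons]
    -- the A step
    have hsd : s < (d.length : Int) := by omega
    have hset1 : PySem.List.pySetD d s (PySem.List.pyGetD d s 0 + 1)
        = d.set s.toNat (d.getD s.toNat 0 + 1) := by
      rw [PySem.List.pySetD_of_nonneg d _ hs, PySem.List.pyGetD_eq_getElem d 0 hs hsd,
        List.getD_eq_getElem]
    rw [hset1]
    set d1 := d.set s.toNat (d.getD s.toNat 0 + 1) with hd1
    have hd1len : d1.length = n' + 1 := by simp [hd1, hd]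
    have he1 : (0 : Int) ≤ e + 1 := by omega
    have he1d : e + 1 < (d1.length : Int) := by omega
    have hset2 : PySem.List.pySetD d1 (e + 1) (PySem.List.pyGetD d1 (e + 1) 0 - 1)
        = d1.set (e + 1).toNat (d1.getD (e + 1).toNat 0 - 1) := by
      rw [PySem.List.pySetD_of_nonneg d1 _ he1, PySem.List.pyGetD_eq_getElem d1 0 he1 he1d,
        List.getD_eq_getElem]
    rw [hset2]
    set d2 := d1.set (e + 1).toNat (d1.getD (e + 1).toNat 0 - 1) with hd2
    have hd2len : d2.length = n' + 1 := by simp [hd2, hd1len]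
    -- the B step
    obtain ⟨hf2len, hf2get⟩ := pvBump_range (e + 1 - s).toNat s (e + 1) f rfl hs (by omega)
    set f2 := (PySem.List.pyRange s (e + 1) 1).foldl
      (fun f i => PySem.List.pySetD f i (PySem.List.pyGetD f i 0 + 1)) f with hf2
    have hf2len' : f2.length = n' := by rw [hf2len, hf]
    -- the invariant is preserved by one request
    have hinv2 : ∀ j : Nat, j < n' → pvPartial d2 j = f2.getD j 0 := by
      intro j hj
      rw [hf2get j, hd2, pvPartial_set d1 _ _ (by omega) j, hd1,
        pvPartial_set d _ _ (by omega) j, ← hinv j hj]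
      have hc1 : (s.toNat : Int) = s := Int.toNat_of_nonneg hs
      have hc2 : ((e + 1).toNat : Int) = e + 1 := Int.toNat_of_nonneg he1
      have hval : d1.getD (e + 1).toNat 0 - 1 - d1.getD (e + 1).toNat 0 = -1 := by ring
      have hx : d.getD s.toNat 0 + 1 - d.getD s.toNat 0 = 1 := by ring
      rw [hval, hx]
      split_ifs <;> omega
    exact ih (fun r hr => hP r (List.mem_cons_of_mem _ hr)) d2 f2 hd2len hf2len' hinv2

-- ===== VERDICT (by name: the statement is the Claim_ definition above) =====
theorem range_to_freq_spec : Claim_unchanged_range_to_freq := by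
  intro requests n _ hPre
  unfold Spec_range_to_freq
  intro hD
  have hP : ∀ r ∈ requests, ∃ s e : Int, r = [s, e] ∧ 0 ≤ s ∧ s ≤ e + 1 ∧ e + 1 ≤ n := by
    intro r hr
    have h := (List.all_eq_true.mp hPre) r hr
    match r, hr, h with
    | [s, e], hr, h =>
      have h1 : 0 ≤ s ∧ s ≤ n ∧ 0 ≤ e + 1 ∧ e < n := by
        simpa using h
      have h2 : ¬ (e + 1 < s) := by
        intro hc
        refine hD ?_
        unfold D_range_to_freq
        exact ⟨[s, e], hr, by simp, by simpa using hc⟩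
      exact ⟨s, e, rfl, by omega, by omega, by omega⟩
    | [], _, h => simp at h
    | [_], _, h => simp at h
    | _ :: _ :: _ :: _, _, h => simp at h
  by_cases hn : 0 ≤ n
  · -- n ≥ 0: the general argument
    set n' := n.toNat with hn'
    have hcn : ((n' : Nat) : Int) = n := Int.toNat_of_nonneg hn
    have hP' : ∀ r ∈ requests, ∃ s e : Int, r = [s, e] ∧ 0 ≤ s ∧ s ≤ e + 1 ∧ e + 1 ≤ (n' : Int) := by
      intro r hr; obtain ⟨s, e, h1, h2, h3, h4⟩ := hP r hr
      exact ⟨s, e, h1, h2, h3, by omega⟩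
    unfold range_to_freq range_to_freq_alt
    simp only
    have hrepl : (n + 1).toNat = n' + 1 := by omega
    rw [hrepl, ← hcn]
    simp only [Int.toNat_natCast]
    obtain ⟨hAlen, hBlen, hAB⟩ := pvMain n' requests hP'
      (List.replicate (n' + 1) 0) (List.replicate n' 0)
      (by simp) (by simp)
      (fun j _ => by rw [pvPartial_replicate, pvGetD_replicate])
    obtain ⟨hL2, _, hG2⟩ := pvPrefix_loop
      (requests.foldl (fun diff r =>
        match r with
        | [s, e] =>
            PySem.List.pySetD (PySem.List.pySetD diff s (PySem.List.pyGetD diff s 0 + 1)) (e + 1)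
              (PySem.List.pyGetD (PySem.List.pySetD diff s (PySem.List.pyGetD diff s 0 + 1))
                (e + 1) 0 - 1)
        | _ => diff) (List.replicate (n' + 1) 0))
      (List.replicate n' 0) n' (by simp)
    apply List.ext_getElem
    · simp only [hL2, hBlen, List.length_replicate]
    · intro j hj1 hj2
      rw [← List.getD_eq_getElem _ 0 hj1, ← List.getD_eq_getElem _ 0 hj2, hG2 j]
      have hjn : j < n' := by
        rw [hBlen] at hj2
        exact hj2
      rw [if_pos hjn, hAB j hjn]
  · -- n < 0: Pre_ forces requests = [], both sides are the empty frequency array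
    have hreq : requests = [] := by
      cases requests with
      | nil => rfl
      | cons r rs =>
        obtain ⟨s, e, _, hs, hse, hen⟩ := hP r (List.mem_cons_self ..)
        omega
    subst hreq
    unfold range_to_freq range_to_freq_alt
    simp only [List.foldl_nil]
    rw [PySem.List.pyRange_one_eq_nil (by omega)]
    rfl

theorem range_to_freq_changed : Claim_changed_range_to_freq := by
  unfold Claim_changed_range_to_freq; decide
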